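-- pv_equiv track=rewrite | github.com/Aniya-star/Anya | src/match/match_adaC.py | find_longest_intervals
-- ===== SOURCE A (Python) =====
-- def find_longest_intervals(all_intervals):
--     '''
--     输入：匹配结果区间，[None, [], None,[]...]
--     输出：最终结果区间，[（idx,[]）]
--     '''
--
--     # 获取最大长度
--     max_length = max((len(interval) for interval in all_intervals if interval is not None), default=0)
--     if max_length == 0:
--         return []
--     longest_intervals = []
--     # 返回所有长度等于最大长度的子列表 # 滤掉
--     for index, intervals in enumerate(all_intervals):
--         if not intervals :# not self.is_legal(intervals)
--             continue
--         if len(intervals) == max_length: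
--             longest_intervals.append((index, intervals))
--
--     return longest_intervals # 最大长度的所有连续区间列表的列表
-- ===== SOURCE B (Python) =====
-- def find_longest_intervals(all_intervals):
--     best_len = 0
--     result = []
--     for index, intervals in enumerate(all_intervals):
--         if not intervals:
--             continue
--         if len(intervals) > best_len:
--             best_len = len(intervals)
--             result = [(index, intervals)]
--         elif len(intervals) == best_len:
--             result.append((index, intervals))
--     return result
-- ===== Notes on version B (the rewrite author's own statement) =====
-- stated objective: simpler
-- what changed: Replaces the two-pass max-then-filter (a max over a generator followed by a separate enumerate loop) by a single running-max scan that resets or extends the candidate list as it goes.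
import Mathlib
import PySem

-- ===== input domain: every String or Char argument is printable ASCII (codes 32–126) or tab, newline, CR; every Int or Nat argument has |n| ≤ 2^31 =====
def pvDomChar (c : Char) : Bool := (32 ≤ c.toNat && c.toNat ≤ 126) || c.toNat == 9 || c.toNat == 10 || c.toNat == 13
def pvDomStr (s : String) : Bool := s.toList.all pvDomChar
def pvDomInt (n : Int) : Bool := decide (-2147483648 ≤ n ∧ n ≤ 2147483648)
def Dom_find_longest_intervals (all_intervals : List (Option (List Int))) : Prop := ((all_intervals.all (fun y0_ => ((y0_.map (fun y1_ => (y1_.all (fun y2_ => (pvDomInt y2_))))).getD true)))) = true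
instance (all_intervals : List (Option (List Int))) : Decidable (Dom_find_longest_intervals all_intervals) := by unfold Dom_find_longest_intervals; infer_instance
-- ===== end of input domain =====

-- B replaces A's two-pass max-then-filter with a single running-max scan; objective: simpler (one loop instead of a max pass plus a filter pass).

-- ===== PORT A =====
-- max(gen, default=0): Python max over a list with default 0
def pyMaxD0 (xs : List Int) : Int :=
  match PySem.List.max? xs (fun x => x) with
  | none => 0
  | some m => m

def find_longest_intervals (all_intervals : List (Option (List Int))) : List (Int × List Int) :=
  let max_length : Int := pyMaxD0 ((all_intervals.filterMap (fun o => o)).map (fun l => (l.length : Int)))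
  if max_length = 0 then []
  else
    (PySem.List.enumerate all_intervals 0).foldl
      (fun (longest_intervals : List (Int × List Int)) (p : Int × Option (List Int)) =>
        match p.2 with
        | none => longest_intervals            -- `not intervals` → continue
        | some xs =>
          if xs = [] then longest_intervals    -- `not intervals` → continue
          else if (xs.length : Int) = max_length then longest_intervals ++ [(p.1, xs)]
          else longest_intervals) []

-- ===== PORT B =====
-- single pass: state (best_len, result); reset on strictly longer, append on tie.
def find_longest_intervals_alt (all_intervals : List (Option (List Int))) : List (Int × List Int) :=
  ((PySem.List.enumerate all_intervals 0).foldl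
    (fun (st : Int × List (Int × List Int)) (p : Int × Option (List Int)) =>
      match p.2 with
      | none => st
      | some xs =>
        if xs = [] then st
        else if (xs.length : Int) > st.1 then ((xs.length : Int), [(p.1, xs)])
        else if (xs.length : Int) = st.1 then (st.1, st.2 ++ [(p.1, xs)])
        else st) ((0 : Int), ([] : List (Int × List Int)))).2

-- ===== PRECONDITION & SPEC =====
def Spec_find_longest_intervals (all_intervals : List (Option (List Int))) (out : List (Int × List Int)) : Prop := out = find_longest_intervals_alt all_intervals
instance (all_intervals : List (Option (List Int))) (out : List (Int × List Int)) : Decidable (Spec_find_longest_intervals all_intervals out) := by unfold Spec_find_longest_intervals; infer_instance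

-- ===== CLAIM (what is proved, stated in full; the proofs are below) =====
def Claim_equal_find_longest_intervals : Prop := ∀ (all_intervals : List (Option (List Int))), Dom_find_longest_intervals all_intervals → Spec_find_longest_intervals all_intervals (find_longest_intervals all_intervals)

-- ===== LEMMAS AND PROOFS =====

-- maximal length of the non-None entries (0 if there are none), structurally
def pvM (l : List (Option (List Int))) : Int :=
  match l with
  | [] => 0
  | none :: t => pvM t
  | some xs :: t => max (xs.length : Int) (pvM t)

-- the truthy entries of length m, paired with their index, in order, starting at index i
def pvW (m : Int) (i : Int) (l : List (Option (List Int))) : List (Int × List Int) :=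
  match l with
  | [] => []
  | none :: t => pvW m (i + 1) t
  | some xs :: t =>
    if xs ≠ [] ∧ (xs.length : Int) = m then (i, xs) :: pvW m (i + 1) t else pvW m (i + 1) t

theorem pvM_nonneg (l : List (Option (List Int))) : 0 ≤ pvM l := by
  induction l with
  | nil => simp [pvM]
  | cons h t ih =>
    cases h with
    | none => simpa [pvM] using ih
    | some xs => simp only [pvM]; omega

theorem pvW_zero (i : Int) (l : List (Option (List Int))) : pvW 0 i l = [] := by
  induction l generalizing i with
  | nil => rfl
  | cons h t ih =>
    cases h with
    | none => simpa [pvW] using ih (i + 1)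
    | some xs =>
      simp only [pvW]
      rw [if_neg, ih]
      rintro ⟨hne, hlen⟩
      exact hne (List.length_eq_zero_iff.mp (by exact_mod_cast hlen))

theorem foldl_max_shift (t : List Int) (a b : Int) :
    t.foldl max (max a b) = max a (t.foldl max b) := by
  induction t generalizing a b with
  | nil => simp
  | cons x t ih =>
    simp only [List.foldl_cons]
    rw [max_assoc, ih]

-- A's max_length expression equals pvM
theorem maxlen_eq_pvM (l : List (Option (List Int))) :
    pyMaxD0 ((l.filterMap (fun o => o)).map (fun xs => (xs.length : Int))) = pvM l := by
  induction l with
  | nil => rfl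
  | cons h t ih =>
    cases h with
    | none => simpa [List.filterMap_cons] using ih
    | some xs =>
      simp only [List.filterMap_cons, List.map_cons, pvM, pyMaxD0, PySem.List.max?_id_cons]
      cases hmt : (t.filterMap (fun o => o)).map (fun xs => (xs.length : Int)) with
      | nil =>
        rw [hmt] at ih
        simp only [pyMaxD0, PySem.List.max?] at ih
        have := Int.natCast_nonneg xs.length
        simp only [List.foldl_nil, ← ih]
        omega
      | cons y ys =>
        rw [hmt] at ih
        simp only [pyMaxD0, PySem.List.max?_id_cons] at ih
        simp only [List.foldl_cons, ← ih]
        exact foldl_max_shift ys _ y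

-- A's collection loop appends the winners
theorem foldA (l : List (Option (List Int))) (m i : Int) (acc : List (Int × List Int)) :
    (PySem.List.enumerate l i).foldl
      (fun (longest_intervals : List (Int × List Int)) (p : Int × Option (List Int)) =>
        match p.2 with
        | none => longest_intervals
        | some xs =>
          if xs = [] then longest_intervals
          else if (xs.length : Int) = m then longest_intervals ++ [(p.1, xs)]
          else longest_intervals) acc = acc ++ pvW m i l := by
  induction l generalizing i acc with
  | nil => simp [PySem.List.enumerate_nil, pvW]
  | cons h t ih =>
    cases h with
    | none => simp [PySem.List.enumerate_cons, pvW, ih]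
    | some xs =>
      simp only [PySem.List.enumerate_cons, List.foldl_cons, pvW]
      by_cases hne : xs = []
      · simp [hne, ih]
      · by_cases hl : (xs.length : Int) = m
        · simp [hne, hl, ih]
        · simp [hne, hl, ih]

-- B's scan: from state (b, acc) with 0 ≤ b, the fold returns the running max and the winners,
-- keeping acc exactly when nothing exceeded b.
theorem foldB (l : List (Option (List Int))) (i b : Int) (acc : List (Int × List Int)) (hb : 0 ≤ b) :
    (PySem.List.enumerate l i).foldl
      (fun (st : Int × List (Int × List Int)) (p : Int × Option (List Int)) =>
        match p.2 with
        | none => st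
        | some xs =>
          if xs = [] then st
          else if (xs.length : Int) > st.1 then ((xs.length : Int), [(p.1, xs)])
          else if (xs.length : Int) = st.1 then (st.1, st.2 ++ [(p.1, xs)])
          else st) (b, acc)
    = (max b (pvM l), (if max b (pvM l) = b then acc else []) ++ pvW (max b (pvM l)) i l) := by
  induction l generalizing i b acc with
  | nil =>
    simp [PySem.List.enumerate_nil, pvM, pvW, max_eq_left hb]
  | cons h t ih =>
    cases h with
    | none =>
      simp only [PySem.List.enumerate_cons, List.foldl_cons, pvM, pvW]
      exact ih (i + 1) b acc hb
    | some xs =>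
      simp only [PySem.List.enumerate_cons, List.foldl_cons, pvM, pvW]
      have hL : (0 : Int) ≤ (xs.length : Int) := Int.natCast_nonneg _
      have hMt := pvM_nonneg t
      by_cases hne : xs = []
      · subst hne
        simp only [List.length_nil, Nat.cast_zero, if_true]
        rw [ih (i + 1) b acc hb]
        have h0 : max b (max (0 : Int) (pvM t)) = max b (pvM t) := by omega
        simp only [h0]
        have : ¬ (([] : List Int) ≠ [] ∧ (0 : Int) = max b (pvM t)) := by
          rintro ⟨hc, _⟩; exact hc rfl
        rw [if_neg this]
      · rw [if_neg hne]
        by_cases hgt : (xs.length : Int) > b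
        · rw [if_pos hgt, ih (i + 1) (xs.length : Int) [(i, xs)] hL]
          have hmax : max b (max (xs.length : Int) (pvM t)) = max (xs.length : Int) (pvM t) := by omega
          simp only [hmax]
          have hnb : ¬ (max (xs.length : Int) (pvM t) = b) := by omega
          rw [if_neg hnb]
          by_cases hkeep : max (xs.length : Int) (pvM t) = (xs.length : Int)
          · have hw : xs ≠ [] ∧ (xs.length : Int) = max (xs.length : Int) (pvM t) := ⟨hne, hkeep.symm⟩
            rw [if_pos hkeep, if_pos hw]
            simp
          · rw [if_neg hkeep, if_neg (by rintro ⟨_, hc⟩; exact hkeep hc.symm)]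
        · rw [if_neg hgt]
          by_cases heq : (xs.length : Int) = b
          · rw [if_pos heq, ih (i + 1) b (acc ++ [(i, xs)]) hb]
            have hmax : max b (max (xs.length : Int) (pvM t)) = max b (pvM t) := by omega
            simp only [hmax]
            by_cases hkeep : max b (pvM t) = b
            · simp only [hkeep]
              have hw : (xs.length : Int) = b := heq
              simp [hne, hw]
            · have hwn : ¬ (xs ≠ [] ∧ (xs.length : Int) = max b (pvM t)) := by
                intro h
                exact absurd h.2 (by omega)
              simp [hkeep, hwn]
          · rw [if_neg heq, ih (i + 1) b acc hb]
            have hmax : max b (max (xs.length : Int) (pvM t)) = max b (pvM t) := by omega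
            have hwn : ¬ (xs ≠ [] ∧ (xs.length : Int) = max b (pvM t)) := by
              intro h
              exact absurd h.2 (by omega)
            simp only [hmax]
            simp [hwn]

-- ===== VERDICT (by name: the statement is the Claim_ definition above) =====
theorem find_longest_intervals_spec : Claim_equal_find_longest_intervals := by
  intro l _
  show find_longest_intervals l = find_longest_intervals_alt l
  unfold find_longest_intervals find_longest_intervals_alt
  simp only [maxlen_eq_pvM, foldB l 0 0 [] le_rfl]
  have hM := pvM_nonneg l
  have hmax : max (0 : Int) (pvM l) = pvM l := by omega
  simp only [hmax]
  by_cases h0 : pvM l = 0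
  · simp [h0, pvW_zero]
  · rw [if_neg h0, foldA]
    simp [h0]
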